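-- pv_equiv track=rewrite | github.com/PooyanGhorbani/Sahar | agent_app/utils.py | parse_allowed_sources
-- ===== SOURCE A (Python) =====
-- from typing import Dict, Iterable, List, Tuple
--
-- def parse_allowed_sources(raw: str) -> List[str]:
--     normalized: List[str] = []
--     for item in str(raw).split(','):
--         item = item.strip()
--         if not item:
--             continue
--         if item.upper() == 'ANY' or item == '*':
--             return ['*']
--         normalized.append(item)
--     return normalized
-- ===== SOURCE B (Python) =====
-- def parse_allowed_sources(raw: str):
--     # Character-level state machine: scan str(raw) once, building tokens directly
--     # (cur = committed token text, pend = whitespace seen after it); no split()/strip().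
--     tokens = []
--     cur = ''
--     pend = ''
--     for ch in str(raw) + ',':
--         if ch == ',':
--             if cur:
--                 tokens.append(cur)
--             cur = ''
--             pend = ''
--         elif ch.isspace():
--             if cur:
--                 pend += ch
--         else:
--             cur = cur + pend + ch
--             pend = ''
--     if any(t.upper() == 'ANY' or t == '*' for t in tokens):
--         return ['*']
--     return tokens
-- ===== Notes on version B (the rewrite author's own statement) =====
-- stated objective: alternative
-- what changed: A's loop over the comma-split pieces with a per-token strip and an early return is replaced by a single character-level state machine that builds the stripped tokens directly (no split/strip calls), followed by a separate wildcard scan of the token list.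
import Mathlib
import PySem

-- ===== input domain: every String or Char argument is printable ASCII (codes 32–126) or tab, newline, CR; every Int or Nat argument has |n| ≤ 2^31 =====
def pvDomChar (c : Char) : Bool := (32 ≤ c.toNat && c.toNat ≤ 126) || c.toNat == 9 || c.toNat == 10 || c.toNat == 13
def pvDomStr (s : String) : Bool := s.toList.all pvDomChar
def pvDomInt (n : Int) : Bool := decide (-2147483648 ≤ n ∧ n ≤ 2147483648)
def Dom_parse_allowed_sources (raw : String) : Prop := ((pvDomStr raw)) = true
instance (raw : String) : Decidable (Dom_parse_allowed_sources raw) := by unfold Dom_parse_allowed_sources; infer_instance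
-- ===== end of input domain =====

-- B replaces A's split/strip loop with early return by a one-shot character-level
-- state machine that builds the stripped tokens directly, then a separate wildcard scan
-- (objective: alternative — no split()/strip() calls, a different traversal of the input).

-- the wildcard test 'item.upper() == "ANY" or item == "*"', shared verbatim by both Pythons
def pvWild (t : List Char) : Bool := PySem.Chars.upper t == "ANY".toList || t == ['*']

-- ===== PORT A =====
-- A's for-loop over str(raw).split(',') with early return on a wildcard token, accumulator = normalized
def pvLoopA : List (List Char) → List String → List String
  | [], normalized => normalized
  | piece :: rest, normalized =>
    let item := PySem.Chars.strip piece
    if item = [] then pvLoopA rest normalized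
    else if pvWild item then ["*"]
    else pvLoopA rest (normalized ++ [String.ofList item])

def parse_allowed_sources (raw : String) : List String :=
  pvLoopA (PySem.Chars.splitOn raw.toList [',']) []

-- ===== PORT B =====
-- one step of Source B's for-loop; state = (tokens, cur, pend)
def pvStep (st : List (List Char) × List Char × List Char) (c : Char) :
    List (List Char) × List Char × List Char :=
  let (toks, cur, pend) := st
  if c = ',' then (if cur = [] then toks else toks ++ [cur], [], [])
  else if PySem.Chars.isspace c then (toks, cur, if cur = [] then pend else pend ++ [c])
  else (toks, cur ++ pend ++ [c], [])

def parse_allowed_sources_alt (raw : String) : List String :=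
  let st := (raw.toList ++ [',']).foldl pvStep ([], [], [])
  let tokens := st.1
  if tokens.any pvWild then ["*"] else tokens.map String.ofList

-- ===== PRECONDITION & SPEC =====
def Spec_parse_allowed_sources (raw : String) (out : List String) : Prop := out = parse_allowed_sources_alt raw
instance (raw : String) (out : List String) : Decidable (Spec_parse_allowed_sources raw out) := by unfold Spec_parse_allowed_sources; infer_instance

-- ===== CLAIM (what is proved, stated in full; the proofs are below) =====
def Claim_equal_parse_allowed_sources : Prop := ∀ (raw : String), Dom_parse_allowed_sources raw → Spec_parse_allowed_sources raw (parse_allowed_sources raw)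

-- ===== LEMMAS AND PROOFS =====

-- a direct structural recursion computing splitOn · [','] (proved equal below)
def pvSplit : List Char → List (List Char)
  | [] => [[]]
  | c :: cs =>
    if c = ',' then [] :: pvSplit cs
    else match pvSplit cs with
      | [] => [[c]]
      | p :: ps => (c :: p) :: ps

def pvConsHead (x : List Char) : List (List Char) → List (List Char)
  | [] => [x]
  | p :: ps => (x ++ p) :: ps

theorem pvSplit_ne_nil (cs : List Char) : pvSplit cs ≠ [] := by
  cases cs with
  | nil => simp [pvSplit]
  | cons c cs =>
    simp only [pvSplit]
    split
    · simp
    · split <;> simp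

theorem pvSplitOn_go_eq (l : List Char) : ∀ (fuel : Nat) (cur : List Char) (acc : List (List Char)),
    l.length < fuel →
    PySem.Chars.splitOn.go [','] fuel l cur acc = acc.reverse ++ pvConsHead cur.reverse (pvSplit l) := by
  induction l with
  | nil =>
    intro fuel cur acc h
    match fuel, h with
    | fuel + 1, _ => simp [PySem.Chars.splitOn.go, pvSplit, pvConsHead]
  | cons c rest ih =>
    intro fuel cur acc h
    match fuel, h with
    | fuel + 1, h =>
      simp only [PySem.Chars.splitOn.go]
      by_cases hc : c = ','
      · subst hc
        have hpre : [','].isPrefixOf (',' :: rest) = true := by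
          simp [List.isPrefixOf]
        rw [if_pos hpre]
        have hl : rest.length < fuel := by simpa using h
        rw [show List.drop (List.length [',']) (',' :: rest) = rest by simp]
        rw [ih fuel [] (cur.reverse :: acc) hl]
        rcases hsp : pvSplit rest with _ | ⟨p, ps⟩
        · exact absurd hsp (pvSplit_ne_nil rest)
        · simp [pvSplit, pvConsHead, hsp]
      · have hpre : [','].isPrefixOf (c :: rest) = false := by
          simp [List.isPrefixOf, beq_eq_false_iff_ne, Ne.symm hc]
        rw [if_neg (by simp [hpre])]
        have hl : rest.length < fuel := by simpa using h
        rw [ih fuel (c :: cur) acc hl]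
        rcases hsp : pvSplit rest with _ | ⟨p, ps⟩
        · exact absurd hsp (pvSplit_ne_nil rest)
        · simp [pvSplit, hc, pvConsHead, hsp]

theorem pvSplitOn_eq (cs : List Char) : PySem.Chars.splitOn cs [','] = pvSplit cs := by
  show PySem.Chars.splitOn.go [','] (cs.length + 1) cs [] [] = pvSplit cs
  rw [pvSplitOn_go_eq cs (cs.length + 1) [] [] (by omega)]
  rcases hsp : pvSplit cs with _ | ⟨p, ps⟩
  · exact absurd hsp (pvSplit_ne_nil cs)
  · simp [pvConsHead]

-- A's fused loop equals build-then-scan over the stripped nonempty pieces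
theorem pvLoopA_eq (ts : List (List Char)) (acc : List String) :
    pvLoopA ts acc =
      (if ((ts.map PySem.Chars.strip).filter (fun t => t ≠ [])).any pvWild then ["*"]
       else acc ++ ((ts.map PySem.Chars.strip).filter (fun t => t ≠ [])).map String.ofList) := by
  induction ts generalizing acc with
  | nil => simp [pvLoopA]
  | cons piece rest ih =>
    simp only [pvLoopA, List.map_cons, List.filter_cons]
    by_cases h0 : PySem.Chars.strip piece = []
    · simp [h0, ih]
    · rw [if_neg h0]
      by_cases hw : pvWild (PySem.Chars.strip piece) = true
      · simp [h0, hw]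
      · simp only [Bool.not_eq_true] at hw
        simp [h0, hw, ih]

-- the tokens Source B's state machine will still emit from the rest of the input, given state (cur, pend)
def pvEmit : List Char → List Char → List Char → List (List Char)
  | [], cur, _ => if cur = [] then [] else [cur]
  | c :: cs, cur, pend =>
    if c = ',' then (if cur = [] then [] else [cur]) ++ pvEmit cs [] []
    else if PySem.Chars.isspace c then pvEmit cs cur (if cur = [] then pend else pend ++ [c])
    else pvEmit cs (cur ++ pend ++ [c]) []

theorem pvFoldl_pvStep (cs : List Char) : ∀ (toks : List (List Char)) (cur pend : List Char),
    (cs ++ [',']).foldl pvStep (toks, cur, pend) =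
      (toks ++ pvEmit cs cur pend, [], []) := by
  induction cs with
  | nil =>
    intro toks cur pend
    by_cases h : cur = [] <;> simp [pvStep, pvEmit, h]
  | cons c cs ih =>
    intro toks cur pend
    simp only [List.cons_append, List.foldl_cons]
    by_cases hc : c = ','
    · subst hc
      by_cases h : cur = [] <;> simp [pvStep, pvEmit, h, ih]
    · by_cases hs : PySem.Chars.isspace c = true
      · simp [pvStep, hc, hs, pvEmit, ih]
      · simp [pvStep, hc, hs, pvEmit, ih]

-- the value Source B's state machine finishes the CURRENT token with, from state (cur, pend)
def pvFin : List Char → List Char → List Char → List Char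
  | [], cur, _ => cur
  | c :: p, cur, pend =>
    if PySem.Chars.isspace c then
      (if cur = [] then pvFin p cur pend else pvFin p cur (pend ++ [c]))
    else pvFin p (cur ++ pend ++ [c]) []

-- the committed continuation: pending whitespace is kept only if a non-space char follows
def pvG : List Char → List Char → List Char
  | _, [] => []
  | pend, c :: p =>
    if PySem.Chars.isspace c then pvG (pend ++ [c]) p
    else pend ++ c :: pvG [] p

theorem pvRstrip_cons (c : Char) (p : List Char) :
    PySem.Chars.rstrip (c :: p) =
      if PySem.Chars.rstrip p = [] then (if PySem.Chars.isspace c then [] else [c])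
      else c :: PySem.Chars.rstrip p := by
  simp only [PySem.Chars.rstrip, List.reverse_cons, List.dropWhile_append]
  by_cases h : (List.dropWhile PySem.Chars.isspace p.reverse) = []
  · simp [h, List.dropWhile]
    by_cases hs : PySem.Chars.isspace c = true <;> simp [hs]
  · simp [h, List.isEmpty_iff, List.reverse_eq_nil_iff]

theorem pvG_eq (p : List Char) : ∀ pend : List Char,
    pvG pend p = if PySem.Chars.rstrip p = [] then [] else pend ++ PySem.Chars.rstrip p := by
  induction p with
  | nil => intro pend; simp [pvG, PySem.Chars.rstrip]
  | cons c p ih =>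
    intro pend
    rw [pvRstrip_cons]
    by_cases hs : PySem.Chars.isspace c = true
    · simp only [pvG, hs, if_true, ih]
      by_cases h : PySem.Chars.rstrip p = [] <;> simp [h]
    · simp only [pvG, hs, if_false, Bool.false_eq_true, ih]
      by_cases h : PySem.Chars.rstrip p = [] <;> simp [h]

theorem pvFin_ne_nil (p : List Char) : ∀ (cur pend : List Char), cur ≠ [] →
    pvFin p cur pend = cur ++ pvG pend p := by
  induction p with
  | nil => intro cur pend _; simp [pvFin, pvG]
  | cons c p ih =>
    intro cur pend hc
    by_cases hs : PySem.Chars.isspace c = true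
    · rw [show pvFin (c :: p) cur pend = pvFin p cur (pend ++ [c]) by simp [pvFin, hs, hc],
        show pvG pend (c :: p) = pvG (pend ++ [c]) p by simp [pvG, hs],
        ih cur (pend ++ [c]) hc]
    · rw [show pvFin (c :: p) cur pend = pvFin p (cur ++ pend ++ [c]) [] by simp [pvFin, hs],
        show pvG pend (c :: p) = pend ++ c :: pvG [] p by simp [pvG, hs],
        ih (cur ++ pend ++ [c]) [] (by simp)]
      simp

theorem pvFin_nil (p : List Char) : pvFin p [] [] = PySem.Chars.strip p := by
  induction p with
  | nil => simp [pvFin, PySem.Chars.strip, PySem.Chars.lstrip, PySem.Chars.rstrip]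
  | cons c p ih =>
    by_cases hs : PySem.Chars.isspace c = true
    · simpa [pvFin, hs, PySem.Chars.strip, PySem.Chars.lstrip] using ih
    · rw [show pvFin (c :: p) [] [] = pvFin p [c] [] by simp [pvFin, hs]]
      rw [pvFin_ne_nil p [c] [] (by simp), pvG_eq]
      have h1 : PySem.Chars.strip (c :: p) = PySem.Chars.rstrip (c :: p) := by
        simp [PySem.Chars.strip, PySem.Chars.lstrip, hs]
      rw [h1, pvRstrip_cons]
      by_cases h : PySem.Chars.rstrip p = [] <;> simp [h, hs]

-- what the state machine emits, phrased over the comma-split pieces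
def pvPost (cur pend : List Char) : List (List Char) → List (List Char)
  | [] => []
  | p :: ps =>
    (if pvFin p cur pend = [] then [] else [pvFin p cur pend]) ++
      ((ps.map PySem.Chars.strip).filter (fun t => t ≠ []))

theorem pvPost_nil_nil (ps : List (List Char)) (hps : ps ≠ []) :
    pvPost [] [] ps = ((ps.map PySem.Chars.strip).filter (fun t => t ≠ [])) := by
  rcases ps with _ | ⟨p, ps⟩
  · exact absurd rfl hps
  · simp only [pvPost, pvFin_nil, List.map_cons, List.filter_cons]
    by_cases h : PySem.Chars.strip p = [] <;> simp [h]

theorem pvEmit_eq (cs : List Char) : ∀ (cur pend : List Char),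
    pvEmit cs cur pend = pvPost cur pend (pvSplit cs) := by
  induction cs with
  | nil => intro cur pend; simp [pvEmit, pvSplit, pvPost, pvFin]
  | cons c cs ih =>
    intro cur pend
    by_cases hc : c = ','
    · subst hc
      rw [show pvEmit (',' :: cs) cur pend = (if cur = [] then [] else [cur]) ++ pvEmit cs [] []
          by simp [pvEmit],
        ih [] [], pvPost_nil_nil (pvSplit cs) (pvSplit_ne_nil cs),
        show pvSplit (',' :: cs) = [] :: pvSplit cs by simp [pvSplit]]
      simp [pvPost, pvFin]
    · rcases hsp : pvSplit cs with _ | ⟨p, ps⟩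
      · exact absurd hsp (pvSplit_ne_nil cs)
      · by_cases hs : PySem.Chars.isspace c = true
        · simp only [pvEmit, hc, if_false, hs, if_true, ih, pvSplit, hsp, pvPost, pvFin]
          by_cases h0 : cur = [] <;> simp [h0]
        · simp only [pvEmit, hc, if_false, hs, Bool.false_eq_true, ih, pvSplit, hsp, pvPost, pvFin]

-- ===== VERDICT (by name: the statement is the Claim_ definition above) =====
theorem parse_allowed_sources_spec : Claim_equal_parse_allowed_sources := by
  intro raw _
  unfold Spec_parse_allowed_sources parse_allowed_sources parse_allowed_sources_alt
  rw [pvFoldl_pvStep, pvLoopA_eq, pvSplitOn_eq, pvEmit_eq,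
    pvPost_nil_nil (pvSplit raw.toList) (pvSplit_ne_nil raw.toList)]
  simp
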